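-- pv_equiv track=rewrite | github.com/yt-dlp/yt-dlp | test/test_config.py | _filter_expected_groups
-- ===== SOURCE A (Python) =====
-- def _filter_expected_groups(expected, filepaths):
--     if not filepaths:
--         return expected
--
--     result = {}
--     for group, paths in expected.items():
--         new_paths = []
--         for path in paths:
--             new_paths.append(path)
--             if path in filepaths:
--                 break
--
--         result[group] = new_paths
--
--     return result
-- ===== SOURCE B (Python) =====
-- def _filter_expected_groups(expected, filepaths):
--     if not filepaths:
--         return expected
--     return {
--         group: paths[:next((i for i, p in enumerate(paths) if p in filepaths), len(paths) - 1) + 1]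
--         for group, paths in expected.items()
--     }
-- ===== Notes on version B (the rewrite author's own statement) =====
-- stated objective: alternative
-- what changed: B builds the whole result in one dict comprehension that slices each group's list at the cutoff index of the first path present in filepaths (full copy when none), instead of A's nested loop that appends element-by-element into a mutable dict and breaks; the Lean port of B is a direct map over the groups instead of a dict fold.
import Mathlib
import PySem

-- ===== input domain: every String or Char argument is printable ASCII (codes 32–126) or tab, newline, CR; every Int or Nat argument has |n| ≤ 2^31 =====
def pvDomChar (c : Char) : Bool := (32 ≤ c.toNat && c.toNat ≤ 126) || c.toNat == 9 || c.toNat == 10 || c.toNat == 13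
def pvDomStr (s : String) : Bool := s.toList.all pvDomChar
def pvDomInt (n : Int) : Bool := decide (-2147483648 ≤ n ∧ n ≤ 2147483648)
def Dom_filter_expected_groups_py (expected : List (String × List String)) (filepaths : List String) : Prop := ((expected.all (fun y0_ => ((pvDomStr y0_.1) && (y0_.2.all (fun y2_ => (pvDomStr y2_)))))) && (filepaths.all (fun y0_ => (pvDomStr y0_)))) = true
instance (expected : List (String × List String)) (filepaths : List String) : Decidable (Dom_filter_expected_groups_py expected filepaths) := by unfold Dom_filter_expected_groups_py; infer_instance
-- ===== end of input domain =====

-- B replaces A's nested append-and-break loop over a mutable dict by a single map that slices each group at the cutoff index (alternative decomposition, same cost).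

-- ===== PORT A =====
-- inner loop of A: append each path, break as soon as one is in filepaths
def pvLoopA (filepaths : List String) (paths : List String) : List String :=
  match paths with
  | [] => []
  | p :: rest => if p ∈ filepaths then [p] else p :: pvLoopA filepaths rest

def filter_expected_groups_py (expected : List (String × List String)) (filepaths : List String) : List (String × List String) :=
  if filepaths = [] then expected
  else
    (expected.foldl (fun r gp => r.insert gp.1 (pvLoopA filepaths gp.2)) PySem.Dict.empty).items

-- ===== PORT B =====
-- B: slice each group's paths at the cutoff index (List.findIdx = list length when no path matches, so take (idx+1) is a full copy then)
def filter_expected_groups_py_alt (expected : List (String × List String)) (filepaths : List String) : List (String × List String) :=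
  if filepaths = [] then expected
  else
    expected.map (fun gp => (gp.1, gp.2.take (gp.2.findIdx (fun p => decide (p ∈ filepaths)) + 1)))

-- ===== PRECONDITION & SPEC =====
-- Pre_ excludes association lists with duplicate group keys: 'expected' is a Python dict, whose keys are
-- necessarily distinct, so duplicate-key lists do not represent any Python input (they collapse on dict formation).
def Pre_filter_expected_groups_py (expected : List (String × List String)) (filepaths : List String) : Prop :=
  (expected.map Prod.fst).Nodup
instance (expected : List (String × List String)) (filepaths : List String) : Decidable (Pre_filter_expected_groups_py expected filepaths) := by unfold Pre_filter_expected_groups_py; infer_instance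

def pvWitness_filter_expected_groups_py : (List (String × List String)) × List String :=
  ([("g", ["a", "b", "c"]), ("h", ["d"])], ["b"])

def Spec_filter_expected_groups_py (expected : List (String × List String)) (filepaths : List String) (out : List (String × List String)) : Prop := out = filter_expected_groups_py_alt expected filepaths
instance (expected : List (String × List String)) (filepaths : List String) (out : List (String × List String)) : Decidable (Spec_filter_expected_groups_py expected filepaths out) := by unfold Spec_filter_expected_groups_py; infer_instance

-- ===== CLAIM =====
def Claim_equal_filter_expected_groups_py : Prop := ∀ (expected : List (String × List String)) (filepaths : List String), Dom_filter_expected_groups_py expected filepaths → Pre_filter_expected_groups_py expected filepaths → Spec_filter_expected_groups_py expected filepaths (filter_expected_groups_py expected filepaths)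

-- ===== LEMMAS AND PROOFS =====
-- A's scan-with-break equals B's take-at-cutoff.
theorem pvLoopA_eq_take (filepaths : List String) (paths : List String) :
    pvLoopA filepaths paths
      = paths.take (paths.findIdx (fun p => decide (p ∈ filepaths)) + 1) := by
  induction paths with
  | nil => rfl
  | cons p rest ih =>
    simp only [pvLoopA, List.findIdx_cons]
    by_cases h : p ∈ filepaths
    · simp [h]
    · simp [h, ih, List.take_succ_cons]

-- ===== VERDICT =====
theorem filter_expected_groups_py_spec : Claim_equal_filter_expected_groups_py := by
  intro expected filepaths _ hpre
  unfold Spec_filter_expected_groups_py filter_expected_groups_py filter_expected_groups_py_alt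
  by_cases hf : filepaths = []
  · simp [hf]
  · simp only [if_neg hf]
    rw [PySem.Dict.items_foldl_insert_fresh expected Prod.fst
        (fun gp => pvLoopA filepaths gp.2) PySem.Dict.empty
        (fun a _ => PySem.Dict.contains_empty _) hpre]
    simp [pvLoopA_eq_take, PySem.Dict.empty]
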